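-- pv_equiv track=rewrite | github.com/elKaZe/biblioteca-guerrilla | app/app.py | formatear_elementos_para_template
-- ===== SOURCE A (Python) =====
-- def formatear_elementos_para_template(elementos):
--     """Genero un diccionario con clave la primer letra y todos los elementos que
--     comiencen con ella en una lista como item"""
--
--     diccionario = {}
--     for elemento in elementos:
--         # Dentro del elemento hay dos items, 'url' y 'elemento'
--         primera_letra = elemento.get('elemento')[0].upper()
--         if diccionario.get(primera_letra, None) is None:
--             diccionario[primera_letra] = []
--
--         diccionario[primera_letra].append(elemento)
--     return diccionario
-- ===== SOURCE B (Python) =====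
-- def formatear_elementos_para_template(elementos):
--     """Two-phase: first collect the distinct first letters in order of first
--     appearance, then build each group by filtering the input per letter."""
--     claves = []
--     for e in elementos:
--         letra = e.get('elemento')[0].upper()
--         if letra not in claves:
--             claves.append(letra)
--     return {letra: [e for e in elementos if e.get('elemento')[0].upper() == letra]
--             for letra in claves}
-- ===== Notes on version B (the rewrite author's own statement) =====
-- stated objective: alternative
-- what changed: Replaces A's single-pass incremental dict-of-lists accumulation with a two-phase strategy: first collect the distinct first letters in order of first appearance, then build each group's list by filtering the whole input per letter.
import Mathlib
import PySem

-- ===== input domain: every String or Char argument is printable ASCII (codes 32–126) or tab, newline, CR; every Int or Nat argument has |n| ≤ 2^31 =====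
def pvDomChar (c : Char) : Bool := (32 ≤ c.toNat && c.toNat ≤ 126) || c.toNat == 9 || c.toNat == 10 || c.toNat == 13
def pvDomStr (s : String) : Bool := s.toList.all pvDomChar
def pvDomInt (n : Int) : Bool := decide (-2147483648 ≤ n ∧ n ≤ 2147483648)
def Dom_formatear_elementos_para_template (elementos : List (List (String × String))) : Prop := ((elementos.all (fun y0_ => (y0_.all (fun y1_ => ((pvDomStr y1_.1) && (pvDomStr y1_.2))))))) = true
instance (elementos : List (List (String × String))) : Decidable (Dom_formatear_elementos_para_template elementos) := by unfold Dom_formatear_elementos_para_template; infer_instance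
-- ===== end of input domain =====

-- B groups by collecting the distinct first letters and then filtering the input per letter,
-- instead of A's single-pass dict-of-lists accumulation; same cost class, alternative structure.

-- shared helper: elemento.get('elemento')[0].upper() — both Pythons compute this very expression.
-- The .getD defaults are unreachable inside Pre_ (Python raises TypeError/IndexError exactly there).
def pvKey (e : List (String × String)) : String :=
  PySem.Str.upper (String.ofList [(PySem.Str.pyGet? (((PySem.Dict.mk e).get? "elemento").getD "") 0).getD ' '])

-- ===== PORT A =====
def formatear_elementos_para_template (elementos : List (List (String × String))) : List (String × List (List (String × String))) :=
  (elementos.foldl (fun diccionario elemento =>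
      let primera_letra := pvKey elemento
      let diccionario :=
        if (diccionario.get? primera_letra).isNone then diccionario.insert primera_letra [] else diccionario
      diccionario.modify primera_letra [] (fun l => l ++ [elemento]))
    (PySem.Dict.empty : PySem.Dict String (List (List (String × String))))).items

-- ===== PORT B =====
def formatear_elementos_para_template_alt (elementos : List (List (String × String))) : List (String × List (List (String × String))) :=
  let claves := elementos.foldl (fun ks e =>
      let letra := pvKey e
      if letra ∈ ks then ks else ks ++ [letra]) []
  claves.map (fun letra => (letra, elementos.filter (fun e => pvKey e == letra)))

-- ===== PRECONDITION & SPEC =====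
-- Pre_ excludes exactly the inputs where Python A raises: an element whose 'elemento' entry is
-- missing (None[0] → TypeError) or an empty string (''[0] → IndexError); A returns on everything else.
def Pre_formatear_elementos_para_template (elementos : List (List (String × String))) : Prop :=
  ∀ e ∈ elementos, ((PySem.Dict.mk e).get? "elemento").getD "" ≠ ""
instance (elementos : List (List (String × String))) : Decidable (Pre_formatear_elementos_para_template elementos) := by unfold Pre_formatear_elementos_para_template; infer_instance

def pvWitness_formatear_elementos_para_template : (List (List (String × String))) :=
  [[("elemento", "ana"), ("url", "/a")], [("elemento", "beto")], [("elemento", "Arbol")]]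

def Spec_formatear_elementos_para_template (elementos : List (List (String × String))) (out : List (String × List (List (String × String)))) : Prop := out = formatear_elementos_para_template_alt elementos
instance (elementos : List (List (String × String))) (out : List (String × List (List (String × String)))) : Decidable (Spec_formatear_elementos_para_template elementos out) := by unfold Spec_formatear_elementos_para_template; infer_instance

-- ===== CLAIM (what is proved, stated in full; the proofs are below) =====
def Claim_equal_formatear_elementos_para_template : Prop := ∀ (elementos : List (List (String × String))), Dom_formatear_elementos_para_template elementos → Pre_formatear_elementos_para_template elementos → Spec_formatear_elementos_para_template elementos (formatear_elementos_para_template elementos)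

-- ===== LEMMAS AND PROOFS =====

-- A's "insert [] if absent, then append" step is the same dict as a plain modify-with-default-[].
theorem pv_insert_modify_absorb {ν : Type} (d : PySem.Dict String (List ν)) (k : String)
    (f : List ν → List ν) (h : d.contains k = false) :
    (d.insert k []).modify k [] f = d.modify k [] f := by
  have ha : (d.items.any fun p => p.1 == k) = false := by
    simpa [PySem.Dict.contains] using h
  have hfind : d.items.find? (fun p => p.1 == k) = none := by
    rw [List.find?_eq_none]; intro p hp
    have := List.any_eq_false.mp ha p hp; simpa using this
  have hmap : ∀ (v : List ν), d.items.map (fun p => if p.1 = k then (k, v) else p) = d.items := by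
    intro v
    rw [List.map_congr_left (g := id), List.map_id]
    intro p hp
    have := List.any_eq_false.mp ha p hp
    simp_all
  apply PySem.Dict.ext
  simp [PySem.Dict.modify, PySem.Dict.insert, PySem.Dict.contains, PySem.Dict.getD,
    PySem.Dict.get?, ha, hfind, hmap, List.find?_append, List.any_append]

theorem pv_A_items (elementos : List (List (String × String))) :
    formatear_elementos_para_template elementos =
      (PySem.Set.ofList (elementos.map pvKey)).map
        (fun k => (k, elementos.filter (fun e => pvKey e == k))) := by
  unfold formatear_elementos_para_template
  have hstep :
      (fun (d : PySem.Dict String (List (List (String × String)))) elemento =>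
        let primera_letra := pvKey elemento
        let d' := if (d.get? primera_letra).isNone then d.insert primera_letra [] else d
        d'.modify primera_letra [] (fun l => l ++ [elemento])) =
      (fun d elemento => d.modify (pvKey elemento) [] (fun l => l ++ [elemento])) := by
    funext d elemento
    by_cases h : (d.get? (pvKey elemento)).isNone
    · have hc : d.contains (pvKey elemento) = false :=
        (PySem.Dict.get?_eq_none_iff_contains d (pvKey elemento)).mp (Option.isNone_iff_eq_none.mp h)
      simp only [h, if_pos]
      exact pv_insert_modify_absorb d (pvKey elemento) _ hc
    · simp [h]
  rw [hstep]
  have hmapfold :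
      elementos.foldl (fun d elemento => d.modify (pvKey elemento) [] (fun l => l ++ [elemento]))
          PySem.Dict.empty =
        (elementos.map (fun e => (pvKey e, e))).foldl
          (fun d p => d.modify p.1 [] (fun l => l ++ [p.2])) PySem.Dict.empty := by
    rw [List.foldl_map]
  rw [hmapfold]
  set l := elementos.map (fun e => (pvKey e, e)) with hl
  have hnodup : ((l.foldl (fun d p => d.modify p.1 [] (fun x => x ++ [p.2])) PySem.Dict.empty).keys).Nodup := by
    have := PySem.Dict.nodup_keys_foldl_modify_key l (fun p => p.1) []
      (fun d p v => v ++ [p.2]) PySem.Dict.empty (by simp)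
    exact this
  have hkeys : (l.foldl (fun d p => d.modify p.1 [] (fun x => x ++ [p.2])) PySem.Dict.empty).keys
      = PySem.Set.ofList (elementos.map pvKey) := by
    have := PySem.Dict.keys_foldl_modify_key l (fun p => p.1) []
      (fun d p v => v ++ [p.2]) PySem.Dict.empty
    rw [this]
    have : l.map (fun p => p.1) = elementos.map pvKey := by
      simp [hl, List.map_map, Function.comp]
    rw [this]
    rfl
  rw [PySem.Dict.items_eq_map_keys _ hnodup [], hkeys]
  apply List.map_congr_left
  intro k _
  have hg := PySem.Dict.getD_foldl_modify_append l PySem.Dict.empty k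
  rw [hg]
  simp [hl, List.filter_map, List.map_map, Function.comp_def]

theorem pv_B_keys (elementos : List (List (String × String))) :
    elementos.foldl (fun ks e => let letra := pvKey e; if letra ∈ ks then ks else ks ++ [letra]) []
      = PySem.Set.ofList (elementos.map pvKey) := by
  have hadd : ∀ (s : List String) (x : String),
      PySem.Set.add s x = if x ∈ s then s else s ++ [x] := by
    intro s x; unfold PySem.Set.add; split <;> simp_all
  have : elementos.foldl (fun ks e => let letra := pvKey e; if letra ∈ ks then ks else ks ++ [letra]) []
      = (elementos.map pvKey).foldl (fun ks k => if k ∈ ks then ks else ks ++ [k]) [] := by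
    rw [List.foldl_map]
  rw [this]
  show _ = PySem.Set.ofList (elementos.map pvKey)
  unfold PySem.Set.ofList
  have hgen : ∀ (L : List String) (s : List String),
      L.foldl (fun ks k => if k ∈ ks then ks else ks ++ [k]) s = L.foldl PySem.Set.add s := by
    intro L
    induction L with
    | nil => intro s; rfl
    | cons x t ih => intro s; simp only [List.foldl_cons, hadd]; exact ih _
  exact hgen _ []

-- ===== VERDICT (by name: the statement is the Claim_ definition above) =====
theorem formatear_elementos_para_template_spec : Claim_equal_formatear_elementos_para_template := by
  intro elementos _ _
  unfold Spec_formatear_elementos_para_template formatear_elementos_para_template_alt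
  rw [pv_A_items, pv_B_keys]
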